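-- pv_equiv track=rewrite | github.com/kevoc/tfi_bus_stop_display | src_uC/bus_stop_display/config.py | split_stops_and_prefs
-- ===== SOURCE A (Python) =====
-- def is_integer(my_str):
--     """Return true if the given string is only numbers."""
--     # 48 = ascii 0, 57 = ascii 9
--     return all([48 <= ord(c) <= 57 for c in my_str])
--
-- def split_stops_and_prefs(pieces):
--     """Given a list of stop ids with optional prefs,
--     split them into two lists. All stop IDs must come
--     at the beginning of the list."""
--
--     stop_ids, prefs = [], []
--     for i, piece in enumerate(pieces):
--         if is_integer(piece):
--             stop_ids.append(piece)
--         else: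
--             # the first non-integer value is the end of the
--             # list of stop ids.
--             prefs.extend(pieces[i + 1:])
--             break
--     return stop_ids, prefs
-- ===== SOURCE B (Python) =====
-- def is_integer(my_str):
--     """Return true if the given string is only numbers."""
--     return all('0' <= c <= '9' for c in my_str)
--
-- def split_stops_and_prefs(pieces):
--     """Given a list of stop ids with optional prefs,
--     split them into two lists. All stop IDs must come
--     at the beginning of the list."""
--     # recursion on the list structure: the first non-integer element
--     # terminates the stop-id prefix, everything after it is prefs
--     if not pieces:
--         return [], []
--     head, rest = pieces[0], pieces[1:]
--     if not is_integer(head):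
--         return [], list(rest)
--     stop_ids, prefs = split_stops_and_prefs(rest)
--     return [head] + stop_ids, prefs
-- ===== Notes on version B (the rewrite author's own statement) =====
-- stated objective: alternative
-- what changed: Replaces the indexed loop with enumerate/append/extend-break by structural recursion on the list: the empty list yields two empty lists, a non-integer head yields ([], rest), and an integer head is consed onto the recursive result's stop-id component; no indices or slices of the original list are used.
import Mathlib
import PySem

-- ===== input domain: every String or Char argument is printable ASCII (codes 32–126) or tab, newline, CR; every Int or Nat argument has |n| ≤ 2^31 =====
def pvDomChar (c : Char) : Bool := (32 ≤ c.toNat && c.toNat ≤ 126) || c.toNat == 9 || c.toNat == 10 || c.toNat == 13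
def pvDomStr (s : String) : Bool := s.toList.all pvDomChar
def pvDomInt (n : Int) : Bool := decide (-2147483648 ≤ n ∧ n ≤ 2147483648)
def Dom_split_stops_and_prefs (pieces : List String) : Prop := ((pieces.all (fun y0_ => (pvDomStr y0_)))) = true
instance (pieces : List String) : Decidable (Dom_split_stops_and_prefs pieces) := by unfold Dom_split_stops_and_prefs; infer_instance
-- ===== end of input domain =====

-- B replaces A's indexed loop (enumerate / append / extend-and-break) by structural
-- recursion on the list; objective: alternative decomposition, same cost.

-- module helper is_integer, used by both A and B
def pvIsInteger (s : String) : Bool := s.toList.all (fun c => 48 ≤ c.toNat && c.toNat ≤ 57)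

-- ===== PORT A =====
-- A's for-loop over enumerate(pieces) with append / extend-and-break
def pvGoA (pieces : List String) : List String → Nat → List String → List String × List String
  | [], _, stop_ids => (stop_ids, [])
  | piece :: rest, i, stop_ids =>
    if pvIsInteger piece then
      pvGoA pieces rest (i + 1) (stop_ids ++ [piece])
    else
      (stop_ids, [] ++ PySem.List.slice pieces (some ((i : Int) + 1)) none)

def split_stops_and_prefs (pieces : List String) : List String × List String :=
  pvGoA pieces pieces 0 []

-- ===== PORT B =====
def split_stops_and_prefs_alt (pieces : List String) : List String × List String :=
  match pieces with
  | [] => ([], [])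
  | head :: rest =>
    if !pvIsInteger head then ([], rest)
    else
      let (stop_ids, prefs) := split_stops_and_prefs_alt rest
      (head :: stop_ids, prefs)

-- ===== PRECONDITION & SPEC =====
def Spec_split_stops_and_prefs (pieces : List String) (out : List String × List String) : Prop := out = split_stops_and_prefs_alt pieces
instance (pieces : List String) (out : List String × List String) : Decidable (Spec_split_stops_and_prefs pieces out) := by unfold Spec_split_stops_and_prefs; infer_instance

-- ===== CLAIM (what is proved, stated in full; the proofs are below) =====
def Claim_equal_split_stops_and_prefs : Prop := ∀ (pieces : List String), Dom_split_stops_and_prefs pieces → Spec_split_stops_and_prefs pieces (split_stops_and_prefs pieces)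

-- ===== LEMMAS AND PROOFS =====

theorem pvGoA_eq (pieces : List String) :
    ∀ (rem : List String) (i : Nat) (acc : List String), pieces.drop i = rem →
      pvGoA pieces rem i acc =
        (acc ++ (split_stops_and_prefs_alt rem).1, (split_stops_and_prefs_alt rem).2) := by
  intro rem
  induction rem with
  | nil => intro i acc _; simp [pvGoA, split_stops_and_prefs_alt]
  | cons p rest ih =>
    intro i acc hdrop
    have hrest : pieces.drop (i + 1) = rest := by
      rw [← List.tail_drop, hdrop]; rfl
    by_cases hp : pvIsInteger p = true
    · rw [pvGoA, if_pos hp, ih (i + 1) (acc ++ [p]) hrest]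
      simp [split_stops_and_prefs_alt, hp]
    · have hcast : ((i : Int) + 1) = ((i + 1 : Nat) : Int) := by push_cast; ring
      rw [pvGoA, if_neg hp, hcast, PySem.List.slice_from_natCast, hrest]
      simp [split_stops_and_prefs_alt, hp]

-- ===== VERDICT (by name: the statement is the Claim_ definition above) =====
theorem split_stops_and_prefs_spec : Claim_equal_split_stops_and_prefs := by
  intro pieces _
  unfold Spec_split_stops_and_prefs split_stops_and_prefs
  rw [pvGoA_eq pieces pieces 0 [] (by simp)]
  simp
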